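-- pv_equiv track=rewrite | github.com/HKUST-KnowComp/RE-RegDVAE | definitions/arguments.py | strip_args
-- ===== SOURCE A (Python) =====
-- def strip_args(args):
--     if args is None:
--         return None
--     name_set = set()
--     # remove redundant args
--     for i in range(len(args) - 1, -1, -1):
--         name = args[i]
--         if name.startswith("--"):
--             if name in name_set:  # a redundant argument
--                 args.pop(i)
--                 if not args[i].startswith("--"):
--                     args.pop(i)
--             else:
--                 name_set.add(name)
--     return args
-- ===== SOURCE B (Python) =====
-- def strip_args(args):
--     # Single reverse pass with a seen-set, rebuilding the result instead of
--     # popping from the list by index; mutates args in place via args[:]=.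
--     if args is None:
--         return None
--     seen = set()
--     res = []  # processed suffix, stored in reversed order
--     for tok in reversed(args):
--         if tok.startswith("--"):
--             if tok in seen:
--                 if res and not res[-1].startswith("--"):
--                     res.pop()
--             else:
--                 seen.add(tok)
--                 res.append(tok)
--         else:
--             res.append(tok)
--     res.reverse()
--     args[:] = res
--     return args
-- ===== Notes on version B (the rewrite author's own statement) =====
-- stated objective: alternative
-- what changed: Replaces A's backward index loop that pops elements out of the list in place by a single pass over reversed(args) that maintains a seen-set and rebuilds the result list, written back with args[:]=.
import Mathlib
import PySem

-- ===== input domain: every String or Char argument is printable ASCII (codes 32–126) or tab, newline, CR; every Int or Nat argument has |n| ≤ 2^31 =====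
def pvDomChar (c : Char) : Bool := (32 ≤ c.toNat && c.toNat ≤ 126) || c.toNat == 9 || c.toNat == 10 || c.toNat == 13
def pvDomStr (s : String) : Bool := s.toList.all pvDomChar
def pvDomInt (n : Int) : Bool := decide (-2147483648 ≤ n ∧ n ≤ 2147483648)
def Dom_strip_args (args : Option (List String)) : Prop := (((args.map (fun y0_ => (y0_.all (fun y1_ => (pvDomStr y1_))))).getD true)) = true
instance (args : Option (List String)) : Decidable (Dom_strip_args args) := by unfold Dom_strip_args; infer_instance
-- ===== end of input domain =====

-- B replaces A's backward index loop with in-place pops by one pass over the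
-- reversed list that keeps a seen-set and rebuilds the result (alternative
-- decomposition); both Pythons mutate args in place, the theorems are about the
-- return value.

-- ===== PORT A =====
-- loop body of A's 'for i in range(len(args)-1, -1, -1)'; state = (args, name_set)
def stripStepA (s : List String × PySem.Set String) (i : Int) : List String × PySem.Set String :=
  match PySem.List.pyGet? s.1 i with
  | none => s                                  -- unreachable for A's indices
  | some name =>
    if PySem.Str.startswith name "--" then
      if PySem.Set.contains s.2 name then
        match PySem.List.pop? s.1 i with
        | none => s                            -- unreachable (i in range)
        | some (_, l1) =>
          match PySem.List.pyGet? l1 i with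
          | none => (l1, s.2)                  -- unreachable (a later duplicate survives)
          | some nxt =>
            if PySem.Str.startswith nxt "--" then (l1, s.2)
            else
              match PySem.List.pop? l1 i with
              | none => (l1, s.2)              -- unreachable
              | some (_, l2) => (l2, s.2)
      else (s.1, PySem.Set.add s.2 name)
    else s

def strip_args (args : Option (List String)) : Option (List String) :=
  match args with
  | none => none
  | some l =>
    some (((PySem.List.pyRange ((l.length : Int) - 1) (-1) (-1)).foldl stripStepA
      (l, PySem.Set.empty)).1)

-- ===== PORT B =====
-- loop body of B's 'for tok in reversed(args)'; state = (res, seen), res reversed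
def stripStepB (s : List String × PySem.Set String) (tok : String) : List String × PySem.Set String :=
  if PySem.Str.startswith tok "--" then
    if PySem.Set.contains s.2 tok then
      match s.1.getLast? with                  -- res[-1] (guarded by 'if res')
      | none => s
      | some last => if PySem.Str.startswith last "--" then s else (s.1.dropLast, s.2)
    else (s.1 ++ [tok], PySem.Set.add s.2 tok)
  else (s.1 ++ [tok], s.2)

def strip_args_alt (args : Option (List String)) : Option (List String) :=
  match args with
  | none => none
  | some l =>
    some ((l.reverse.foldl stripStepB ([], PySem.Set.empty)).1.reverse)

-- ===== PRECONDITION & SPEC =====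
def Spec_strip_args (args : Option (List String)) (out : Option (List String)) : Prop := out = strip_args_alt args
instance (args : Option (List String)) (out : Option (List String)) : Decidable (Spec_strip_args args out) := by unfold Spec_strip_args; infer_instance

-- ===== CLAIM (what is proved, stated in full; the proofs are below) =====
def Claim_equal_strip_args : Prop := ∀ (args : Option (List String)), Dom_strip_args args → Spec_strip_args args (strip_args args)

-- ===== LEMMAS AND PROOFS =====

-- reference recursion: process the suffix first, then fold the head in
def stripRec : List String → PySem.Set String → List String × PySem.Set String
  | [], ns => ([], ns)
  | x :: rest, ns =>
    let p := stripRec rest ns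
    if PySem.Str.startswith x "--" then
      if PySem.Set.contains p.2 x then
        match p.1 with
        | [] => ([], p.2)
        | h :: t => if PySem.Str.startswith h "--" then (h :: t, p.2) else (t, p.2)
      else (x :: p.1, PySem.Set.add p.2 x)
    else (x :: p.1, p.2)

theorem stripRec_cons (x : String) (rest : List String) (ns : PySem.Set String)
    (r : List String) (ns' : PySem.Set String) (hre : stripRec rest ns = (r, ns')) :
    stripRec (x :: rest) ns =
      (if PySem.Str.startswith x "--" then
         if PySem.Set.contains ns' x then
           match r with
           | [] => ([], ns')
           | h :: t => if PySem.Str.startswith h "--" then (h :: t, ns') else (t, ns')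
         else (x :: r, PySem.Set.add ns' x)
       else (x :: r, ns')) := by
  conv_lhs => rw [stripRec]
  simp only [hre]
  cases r <;> rfl

theorem pyGet?_cons_shift (x : String) (l : List String) (i : Int) (h : 0 ≤ i) :
    PySem.List.pyGet? (x :: l) (i+1) = PySem.List.pyGet? l i := by
  simp only [PySem.List.pyGet?, PySem.List.pyIdx?]
  rw [if_pos (by omega), if_pos h]
  by_cases hl : i < (l.length : Int)
  · rw [if_pos (by simp; omega), if_pos hl]
    simp only [Option.bind_some]
    have : (i+1).toNat = i.toNat + 1 := by omega
    rw [this]; simp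
  · rw [if_neg (by simp; omega), if_neg hl]
    simp

theorem pop?_cons_shift (x : String) (l : List String) (i : Int) (h : 0 ≤ i) :
    PySem.List.pop? (x :: l) (i+1) = (PySem.List.pop? l i).map (fun p => (p.1, x :: p.2)) := by
  simp only [PySem.List.pop?, PySem.List.pyIdx?]
  rw [if_pos (by omega), if_pos h]
  by_cases hl : i < (l.length : Int)
  · rw [if_pos (by simp; omega), if_pos hl]
    simp only [Option.bind_some]
    have : (i+1).toNat = i.toNat + 1 := by omega
    rw [this]
    have hlt : i.toNat < l.length := by omega
    simp [List.getElem?_eq_getElem hlt]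
  · rw [if_neg (by simp; omega), if_neg hl]
    simp

theorem stepA_shift (x : String) (l : List String) (ns : PySem.Set String) (i : Int) (h : 0 ≤ i) :
    stripStepA (x :: l, ns) (i+1) = (x :: (stripStepA (l, ns) i).1, (stripStepA (l, ns) i).2) := by
  unfold stripStepA
  simp only
  rw [pyGet?_cons_shift x l i h]
  cases h1 : PySem.List.pyGet? l i with
  | none => simp
  | some name =>
    simp only
    by_cases hf : PySem.Str.startswith name "--"
    · rw [if_pos hf, if_pos hf]
      by_cases hm : PySem.Set.contains ns name
      · rw [if_pos hm, if_pos hm]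
        rw [pop?_cons_shift x l i h]
        cases h2 : PySem.List.pop? l i with
        | none => simp
        | some p =>
          obtain ⟨v, l1⟩ := p
          simp only [Option.map_some]
          rw [pyGet?_cons_shift x l1 i h]
          cases h3 : PySem.List.pyGet? l1 i with
          | none => simp
          | some nxt =>
            simp only
            by_cases hg : PySem.Str.startswith nxt "--"
            · rw [if_pos hg, if_pos hg]
            · rw [if_neg hg, if_neg hg]
              rw [pop?_cons_shift x l1 i h]
              cases h4 : PySem.List.pop? l1 i with
              | none => simp
              | some q => obtain ⟨w, l2⟩ := q; simp
      · rw [if_neg hm, if_neg hm]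
    · rw [if_neg hf, if_neg hf]

theorem foldA_shift (is : List Int) (hpos : ∀ i ∈ is, 0 ≤ i) (x : String) :
    ∀ (l : List String) (ns : PySem.Set String),
    (is.map (· + 1)).foldl stripStepA (x :: l, ns)
      = (x :: (is.foldl stripStepA (l, ns)).1, (is.foldl stripStepA (l, ns)).2) := by
  induction is with
  | nil => intro l ns; simp
  | cons i tl ih =>
    intro l ns
    have hi : 0 ≤ i := hpos i (by simp)
    have htl : ∀ j ∈ tl, 0 ≤ j := fun j hj => hpos j (by simp [hj])
    simp only [List.map_cons, List.foldl_cons]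
    rw [stepA_shift x l ns i hi]
    exact ih htl _ _

-- split range(m, -1, -1) into the shifted range(m-1, -1, -1) followed by index 0
theorem pyRange_countdown_split (m : Nat) :
    PySem.List.pyRange (m : Int) (-1) (-1)
      = ((PySem.List.pyRange ((m : Int) - 1) (-1) (-1)).map (· + 1)) ++ [(0 : Int)] := by
  rw [PySem.List.pyRange_neg_one, PySem.List.pyRange_neg_one]
  have h1 : ((m : Int) - (-1)).toNat = m + 1 := by omega
  have h2 : ((m : Int) - 1 - (-1)).toNat = m := by omega
  rw [h1, h2, List.range_succ]
  simp only [List.map_append, List.map_map, List.map_cons, List.map_nil]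
  congr 1
  · apply List.map_congr_left
    intro k _
    simp only [Function.comp_apply]
    ring
  · simp

theorem step0_get (x : String) (r : List String) :
    PySem.List.pyGet? (x :: r) 0 = some x := by
  simp [PySem.List.pyGet?, PySem.List.pyIdx?]

theorem step0_pop (x : String) (r : List String) :
    PySem.List.pop? (x :: r) 0 = some (x, r) := by
  simp [PySem.List.pop?, PySem.List.pyIdx?]

theorem foldA_eq_stripRec (l : List String) :
    ∀ ns : PySem.Set String,
    (PySem.List.pyRange ((l.length : Int) - 1) (-1) (-1)).foldl stripStepA (l, ns) = stripRec l ns := by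
  induction l with
  | nil =>
    intro ns
    rw [PySem.List.pyRange_neg_one_eq_nil (by simp)]
    simp [stripRec]
  | cons x rest ih =>
    intro ns
    cases hrec : stripRec rest ns with
    | mk r ns' =>
      have hlen : ((x :: rest).length : Int) - 1 = (rest.length : Int) := by simp
      rw [hlen, pyRange_countdown_split rest.length, List.foldl_append]
      have hpos : ∀ i ∈ PySem.List.pyRange ((rest.length : Int) - 1) (-1) (-1), 0 ≤ i := by
        intro i hi
        have := (PySem.List.mem_pyRange_neg_one).1 hi
        omega
      rw [foldA_shift _ hpos x rest ns, ih ns, hrec]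
      simp only [List.foldl_cons, List.foldl_nil]
      rw [stripRec_cons x rest ns r ns' hrec]
      -- the index-0 step on (x :: r, ns') is exactly stripRec's head step
      unfold stripStepA
      simp only
      rw [step0_get]
      simp only
      by_cases hf : PySem.Str.startswith x "--"
      · rw [if_pos hf, if_pos hf]
        by_cases hm : PySem.Set.contains ns' x
        · rw [if_pos hm, if_pos hm, step0_pop]
          cases r with
          | nil => simp [PySem.List.pyGet?, PySem.List.pyIdx?]
          | cons h t =>
            simp only
            rw [step0_get]
            simp only
            by_cases hg : PySem.Str.startswith h "--"
            · rw [if_pos hg, if_pos hg]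
            · rw [if_neg hg, if_neg hg, step0_pop]
        · rw [if_neg hm, if_neg hm]
      · rw [if_neg hf, if_neg hf]

theorem foldB_eq_stripRec (l : List String) :
    l.reverse.foldl stripStepB ([], PySem.Set.empty)
      = ((stripRec l PySem.Set.empty).1.reverse, (stripRec l PySem.Set.empty).2) := by
  induction l with
  | nil => simp [stripRec]
  | cons x rest ih =>
    cases hrec : stripRec rest PySem.Set.empty with
    | mk r ns' =>
      rw [List.reverse_cons, List.foldl_append, ih, hrec]
      simp only [List.foldl_cons, List.foldl_nil]
      rw [stripRec_cons x rest PySem.Set.empty r ns' hrec]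
      unfold stripStepB
      simp only
      by_cases hf : PySem.Str.startswith x "--"
      · rw [if_pos hf, if_pos hf]
        by_cases hm : PySem.Set.contains ns' x
        · rw [if_pos hm, if_pos hm]
          cases r with
          | nil => simp
          | cons h t =>
            have hlast : (h :: t).reverse.getLast? = some h := by
              simp [List.getLast?_reverse]
            rw [hlast]
            simp only
            by_cases hg : PySem.Str.startswith h "--"
            · rw [if_pos hg, if_pos hg]
            · rw [if_neg hg, if_neg hg]
              simp [List.reverse_cons,]
        · rw [if_neg hm, if_neg hm]
          simp [List.reverse_cons]
      · rw [if_neg hf, if_neg hf]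
        simp [List.reverse_cons]

-- ===== VERDICT (by name: the statement is the Claim_ definition above) =====
theorem strip_args_spec : Claim_equal_strip_args := by
  intro args _
  unfold Spec_strip_args strip_args strip_args_alt
  cases args with
  | none => rfl
  | some l =>
    simp only
    rw [foldA_eq_stripRec l PySem.Set.empty, foldB_eq_stripRec l]
    simp
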